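-- pv_equiv track=rewrite | github.com/satyasai-scketch/Recruiter-Portal-Backend-DDD | app/domain/job_description/rules.py | compute_diff_against_template
-- ===== SOURCE A (Python) =====
-- from typing import Iterable, List, Tuple
--
-- def compute_diff_against_template(jd_text: str, template_text: str) -> List[Tuple[str, str]]:
-- 	"""Compute a high-level diff between JD text and a template.
--
-- 	Args:
-- 		jd_text: The recruiter's provided JD text.
-- 		template_text: The canonical template text used as a reference.
--
-- 	Returns:
-- 		A list of (status, fragment) tuples where status is one of
-- 		"missing" | "extra" | "present" indicating the relationship
-- 		between JD and template for coarse-grained guidance.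
--
-- 	Rationale:
-- 		This rule allows a lightweight gap analysis to inform refinement prompts.
-- 	"""
-- 	# Very coarse token presence comparison (placeholder domain rule)
-- 	jd_tokens = set(token for token in jd_text.lower().split() if token)
-- 	tpl_tokens = set(token for token in template_text.lower().split() if token)
--
-- 	missing = sorted(list(tpl_tokens - jd_tokens))
-- 	extra = sorted(list(jd_tokens - tpl_tokens))
-- 	present = sorted(list(jd_tokens & tpl_tokens))
--
-- 	result: List[Tuple[str, str]] = []
-- 	result.extend(("missing", tok) for tok in missing)
-- 	result.extend(("extra", tok) for tok in extra)
-- 	result.extend(("present", tok) for tok in present)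
-- 	return result
-- ===== SOURCE B (Python) =====
-- from typing import List, Tuple
--
--
-- def _sorted_unique(text: str) -> List[str]:
--     """Sorted distinct tokens of text.lower().split(), via sort + adjacent dedup."""
--     out: List[str] = []
--     prev = None
--     for t in sorted(text.lower().split()):
--         if t != prev:
--             out.append(t)
--             prev = t
--     return out
--
--
-- def compute_diff_against_template(jd_text: str, template_text: str) -> List[Tuple[str, str]]:
--     jd = _sorted_unique(jd_text)
--     tpl = _sorted_unique(template_text)
--     missing: List[Tuple[str, str]] = []
--     extra: List[Tuple[str, str]] = []
--     present: List[Tuple[str, str]] = []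
--     i = j = 0
--     while i < len(jd) and j < len(tpl):
--         if jd[i] == tpl[j]:
--             present.append(("present", jd[i]))
--             i += 1
--             j += 1
--         elif jd[i] < tpl[j]:
--             extra.append(("extra", jd[i]))
--             i += 1
--         else:
--             missing.append(("missing", tpl[j]))
--             j += 1
--     missing.extend(("missing", t) for t in tpl[j:])
--     extra.extend(("extra", t) for t in jd[i:])
--     return missing + extra + present
-- ===== Notes on version B (the rewrite author's own statement) =====
-- stated objective: alternative
-- what changed: B drops A's set algebra entirely: it sorts each side's token list with an adjacent-dedup pass and then classifies every token by a single two-pointer sorted-merge instead of building hash sets and taking three set-difference/intersection passes each sorted separately.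
import Mathlib
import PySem

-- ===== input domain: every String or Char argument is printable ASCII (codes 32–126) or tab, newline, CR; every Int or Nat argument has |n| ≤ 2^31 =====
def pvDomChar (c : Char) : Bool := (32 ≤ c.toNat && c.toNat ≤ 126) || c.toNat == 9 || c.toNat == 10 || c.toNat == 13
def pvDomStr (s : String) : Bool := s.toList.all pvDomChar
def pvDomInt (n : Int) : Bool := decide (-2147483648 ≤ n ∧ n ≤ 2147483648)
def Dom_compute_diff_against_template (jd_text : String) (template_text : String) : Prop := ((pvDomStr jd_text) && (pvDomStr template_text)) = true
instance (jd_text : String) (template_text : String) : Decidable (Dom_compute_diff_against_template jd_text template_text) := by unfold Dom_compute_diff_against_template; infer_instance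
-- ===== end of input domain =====

-- B replaces A's set algebra (three set-difference/intersection passes, each sorted separately)
-- by a sort-merge diff: sort each side's tokens with adjacent dedup, then one two-pointer merge
-- classifies every token; alternative structure, same results.

-- ===== PORT A =====
def compute_diff_against_template (jd_text : String) (template_text : String) : List (String × String) :=
  let jd_tokens : PySem.Set String :=
    PySem.Set.ofList ((PySem.Str.split₀ (PySem.Str.lower jd_text)).filter (fun token => token != ""))
  let tpl_tokens : PySem.Set String :=
    PySem.Set.ofList ((PySem.Str.split₀ (PySem.Str.lower template_text)).filter (fun token => token != ""))
  let missing := PySem.List.sorted (PySem.Set.diff tpl_tokens jd_tokens) (fun x => x) false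
  let extra := PySem.List.sorted (PySem.Set.diff jd_tokens tpl_tokens) (fun x => x) false
  let present := PySem.List.sorted (PySem.Set.inter jd_tokens tpl_tokens) (fun x => x) false
  (missing.map (fun tok => ("missing", tok)) ++ extra.map (fun tok => ("extra", tok)))
    ++ present.map (fun tok => ("present", tok))

-- ===== PORT B =====
-- the `for t in …: if t != prev: out.append(t); prev = t` loop of _sorted_unique
def pvDedupGo : Option String → List String → List String
  | _, [] => []
  | prev, t :: rest =>
    if some t ≠ prev then t :: pvDedupGo (some t) rest else pvDedupGo prev rest

def pvSortedUnique (text : String) : List String :=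
  pvDedupGo none (PySem.List.sorted (PySem.Str.split₀ (PySem.Str.lower text)) (fun x => x) false)

-- B's two-pointer while loop (plus the two trailing extends) as a tail recursion on the
-- unconsumed suffixes jd[i:], tpl[j:] with the three output lists as accumulators
def pvMergeLoop : List String → List String → List (String × String) → List (String × String) →
    List (String × String) →
    List (String × String) × List (String × String) × List (String × String)
  | a :: jd, b :: tpl, m, e, p =>
    if a = b then pvMergeLoop jd tpl m e (p ++ [("present", a)])
    else if a < b then pvMergeLoop jd (b :: tpl) m (e ++ [("extra", a)]) p
    else pvMergeLoop (a :: jd) tpl (m ++ [("missing", b)]) e p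
  | jd, tpl, m, e, p =>
    (m ++ tpl.map (fun t => ("missing", t)), e ++ jd.map (fun t => ("extra", t)), p)
termination_by jd tpl _ _ _ => jd.length + tpl.length

def compute_diff_against_template_alt (jd_text : String) (template_text : String) : List (String × String) :=
  let jd := pvSortedUnique jd_text
  let tpl := pvSortedUnique template_text
  let st := pvMergeLoop jd tpl [] [] []
  st.1 ++ st.2.1 ++ st.2.2

-- ===== PRECONDITION & SPEC =====
def Spec_compute_diff_against_template (jd_text : String) (template_text : String) (out : List (String × String)) : Prop := out = compute_diff_against_template_alt jd_text template_text
instance (jd_text : String) (template_text : String) (out : List (String × String)) : Decidable (Spec_compute_diff_against_template jd_text template_text out) := by unfold Spec_compute_diff_against_template; infer_instance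

-- ===== CLAIM (what is proved, stated in full; the proofs are below) =====
def Claim_equal_compute_diff_against_template : Prop := ∀ (jd_text : String) (template_text : String), Dom_compute_diff_against_template jd_text template_text → Spec_compute_diff_against_template jd_text template_text (compute_diff_against_template jd_text template_text)

-- ===== LEMMAS AND PROOFS =====

-- str.split() never produces an empty piece (go-level invariant)
lemma pv_split₀_go_ne_nil : ∀ (s cur : List Char) (acc : List (List Char)),
    (∀ a ∈ acc, a ≠ []) → ∀ t ∈ PySem.Chars.split₀.go s cur acc, t ≠ [] := by
  intro s
  induction s with
  | nil =>
    intro cur acc hacc t ht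
    simp only [PySem.Chars.split₀.go] at ht
    by_cases hc : cur.isEmpty
    · simp [hc] at ht
      exact hacc _ ht
    · simp [hc] at ht
      rcases ht with h | h
      · exact hacc _ h
      · subst h
        simp only [ne_eq, List.reverse_eq_nil_iff]
        simpa [List.isEmpty_iff] using hc
  | cons c rest ih =>
    intro cur acc hacc t ht
    simp only [PySem.Chars.split₀.go] at ht
    by_cases hs : PySem.Chars.isspace c
    · by_cases hc : cur.isEmpty
      · simp [hs, hc] at ht
        exact ih [] acc hacc t ht
      · simp [hs, hc] at ht
        refine ih [] (cur.reverse :: acc) ?_ t ht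
        intro a ha
        rcases List.mem_cons.mp ha with h | h
        · subst h
          simp only [ne_eq, List.reverse_eq_nil_iff]
          simpa [List.isEmpty_iff] using hc
        · exact hacc _ h
    · simp [hs] at ht
      exact ih (c :: cur) acc hacc t ht

lemma pv_mem_split₀_ne_empty (s : String) : ∀ t ∈ PySem.Str.split₀ s, t ≠ "" := by
  intro t ht hemp
  have h1 : t.toList ∈ PySem.Chars.split₀ s.toList := by
    rw [← PySem.Str.split₀_map_toList]
    exact List.mem_map_of_mem ht
  have h2 := pv_split₀_go_ne_nil s.toList [] [] (by simp) t.toList h1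
  subst hemp
  simp at h2

lemma pv_filter_empty_split₀ (s : String) :
    (PySem.Str.split₀ s).filter (fun token => token != "") = PySem.Str.split₀ s := by
  rw [List.filter_eq_self]
  intro t ht
  simpa using pv_mem_split₀_ne_empty s t ht

-- adjacent dedup of a ≤-sorted list: strictly increasing, same members (minus prev)
lemma pv_dedupGo_spec : ∀ (l : List String) (prev : Option String),
    l.Pairwise (· ≤ ·) → (∀ q, prev = some q → ∀ x ∈ l, q ≤ x) →
    (pvDedupGo prev l).Pairwise (· < ·)
    ∧ (∀ x, x ∈ pvDedupGo prev l ↔ x ∈ l ∧ prev ≠ some x)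
    ∧ (∀ q, prev = some q → ∀ x ∈ pvDedupGo prev l, q < x) := by
  intro l
  induction l with
  | nil => intro prev _ _; simp [pvDedupGo]
  | cons t rest ih =>
    intro prev hpw hbd
    obtain ⟨htle, hrest⟩ := List.pairwise_cons.mp hpw
    by_cases hne : some t ≠ prev
    · rw [show pvDedupGo prev (t :: rest) = t :: pvDedupGo (some t) rest from by
        simp [pvDedupGo, hne]]
      obtain ⟨ihpw, ihmem, ihgt⟩ := ih (some t) hrest
        (fun q hq x hx => by injection hq with hq; subst hq; exact htle x hx)
      refine ⟨List.pairwise_cons.mpr ⟨fun x hx => ihgt t rfl x hx, ihpw⟩, ?_, ?_⟩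
      · intro x
        constructor
        · intro hx
          rcases List.mem_cons.mp hx with h | h
          · subst h
            exact ⟨List.mem_cons_self, fun hc => hne hc.symm⟩
          · obtain ⟨hxr, hxt⟩ := (ihmem x).mp h
            refine ⟨List.mem_cons_of_mem _ hxr, ?_⟩
            rcases prev with _ | q
            · simp
            · intro hc
              injection hc with hc
              have h1 : x ≤ t := hc ▸ hbd q rfl t List.mem_cons_self
              have h2 : t ≤ x := htle x hxr
              exact hxt (congrArg some (le_antisymm h2 h1))
        · rintro ⟨hx, hprev⟩
          rcases List.mem_cons.mp hx with h | h
          · subst h; exact List.mem_cons_self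
          · by_cases hxt : x = t
            · subst hxt; exact List.mem_cons_self
            · exact List.mem_cons_of_mem _
                ((ihmem x).mpr ⟨h, fun hc => hxt (by injection hc with hc; exact hc.symm)⟩)
      · intro q hq x hx
        subst hq
        have hqt : q < t :=
          lt_of_le_of_ne (hbd q rfl t List.mem_cons_self) (fun h => hne (by rw [h]))
        rcases List.mem_cons.mp hx with h | h
        · subst h; exact hqt
        · exact hqt.trans (ihgt t rfl x h)
    · rw [not_ne_iff] at hne
      rw [show pvDedupGo prev (t :: rest) = pvDedupGo prev rest from by
        simp [pvDedupGo, hne]]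
      subst hne
      obtain ⟨ihpw, ihmem, ihgt⟩ := ih (some t) hrest
        (fun q hq x hx => by injection hq with hq; subst hq; exact htle x hx)
      refine ⟨ihpw, ?_, ihgt⟩
      intro x
      rw [ihmem x]
      constructor
      · rintro ⟨hx, hp⟩; exact ⟨List.mem_cons_of_mem _ hx, hp⟩
      · rintro ⟨hx, hp⟩
        rcases List.mem_cons.mp hx with h | h
        · subst h; exact absurd rfl hp
        · exact ⟨h, hp⟩

-- _sorted_unique text = sorted(set(text.lower().split()))
lemma pv_sortedUnique_eq (text : String) :
    pvSortedUnique text =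
      PySem.List.sorted (PySem.Set.ofList (PySem.Str.split₀ (PySem.Str.lower text))) (fun x => x) false := by
  set xs := PySem.Str.split₀ (PySem.Str.lower text) with hxs
  have hpw : (PySem.List.sorted xs (fun x => x) false).Pairwise (· ≤ ·) :=
    PySem.List.sorted_pairwise xs (fun x => x)
  obtain ⟨hlt, hmem, _⟩ := pv_dedupGo_spec (PySem.List.sorted xs (fun x => x) false) none hpw
    (fun q hq => nomatch hq)
  have hperm : (pvDedupGo none (PySem.List.sorted xs (fun x => x) false)).Perm (PySem.Set.ofList xs) := by
    rw [List.perm_ext_iff_of_nodup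
      (List.nodup_iff_pairwise_ne.mpr (hlt.imp (fun h => ne_of_lt h))) (PySem.Set.nodup_ofList xs)]
    intro a
    rw [hmem a]
    simp [PySem.Set.mem_ofList, PySem.List.mem_sorted]
  exact (PySem.List.sorted_eq_of_perm_of_pairwise_lt (PySem.Set.ofList xs) _ (fun x => x) hperm hlt).symm

-- the two-pointer merge over strictly sorted lists computes the three classified groups
lemma pv_mergeLoop_spec : ∀ (jd tpl : List String) (m e p : List (String × String)),
    jd.Pairwise (· < ·) → tpl.Pairwise (· < ·) →
    pvMergeLoop jd tpl m e p =
      (m ++ (tpl.filter (fun t => !decide (t ∈ jd))).map (fun t => ("missing", t)),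
       e ++ (jd.filter (fun t => !decide (t ∈ tpl))).map (fun t => ("extra", t)),
       p ++ (jd.filter (fun t => decide (t ∈ tpl))).map (fun t => ("present", t))) := by
  intro jd tpl m e p
  fun_induction pvMergeLoop jd tpl m e p
  case case1 =>
    rename_i jd b tpl m e p ih
    intro hjd htpl
    obtain ⟨hjgt, hjd'⟩ := List.pairwise_cons.mp hjd
    obtain ⟨htgt, htpl'⟩ := List.pairwise_cons.mp htpl
    rw [ih hjd' htpl']
    have h1 : (b :: tpl).filter (fun t => !decide (t ∈ b :: jd))
        = tpl.filter (fun t => !decide (t ∈ jd)) := by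
      rw [List.filter_cons_of_neg (by simp)]
      exact List.filter_congr (fun t ht => by
        have hne : t ≠ b := ne_of_gt (htgt t ht)
        simp [hne])
    have h2 : (b :: jd).filter (fun t => !decide (t ∈ b :: tpl))
        = jd.filter (fun t => !decide (t ∈ tpl)) := by
      rw [List.filter_cons_of_neg (by simp)]
      exact List.filter_congr (fun t ht => by
        have hne : t ≠ b := ne_of_gt (hjgt t ht)
        simp [hne])
    have h3 : (b :: jd).filter (fun t => decide (t ∈ b :: tpl))
        = b :: jd.filter (fun t => decide (t ∈ tpl)) := by
      rw [List.filter_cons_of_pos (by simp)]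
      exact congrArg _ (List.filter_congr (fun t ht => by
        have hne : t ≠ b := ne_of_gt (hjgt t ht)
        simp [hne]))
    simp only [h1, h2, h3, List.map_cons, List.append_assoc, List.singleton_append]
  case case2 =>
    rename_i a jd b tpl m e p hab hlt ih
    intro hjd htpl
    obtain ⟨hjgt, hjd'⟩ := List.pairwise_cons.mp hjd
    obtain ⟨htgt, _⟩ := List.pairwise_cons.mp htpl
    rw [ih hjd' htpl]
    have hanotin : a ∉ b :: tpl := by
      intro h
      rcases List.mem_cons.mp h with h | h
      · exact hab h
      · exact absurd (htgt a h) (lt_asymm hlt)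
    have h1 : (b :: tpl).filter (fun t => !decide (t ∈ a :: jd))
        = (b :: tpl).filter (fun t => !decide (t ∈ jd)) := by
      refine List.filter_congr (fun t ht => ?_)
      have hne : t ≠ a := by
        rcases List.mem_cons.mp ht with h | h
        · subst h; exact ne_of_gt hlt
        · exact ne_of_gt (lt_trans hlt (htgt t h))
      simp [hne]
    have h2 : (a :: jd).filter (fun t => !decide (t ∈ b :: tpl))
        = a :: jd.filter (fun t => !decide (t ∈ b :: tpl)) :=
      List.filter_cons_of_pos (by simpa using hanotin)
    have h3 : (a :: jd).filter (fun t => decide (t ∈ b :: tpl))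
        = jd.filter (fun t => decide (t ∈ b :: tpl)) :=
      List.filter_cons_of_neg (by simpa using hanotin)
    simp only [h1, h2, h3, List.map_cons, List.append_assoc, List.singleton_append]
  case case3 =>
    rename_i a jd b tpl m e p hab hnlt ih
    intro hjd htpl
    obtain ⟨hjgt, _⟩ := List.pairwise_cons.mp hjd
    obtain ⟨htgt, htpl'⟩ := List.pairwise_cons.mp htpl
    have hba : b < a := lt_of_le_of_ne (not_lt.mp hnlt) (fun h => hab h.symm)
    have hbnotin : b ∉ a :: jd := by
      intro h
      rcases List.mem_cons.mp h with h | h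
      · exact hab h.symm
      · exact absurd (hjgt b h) (lt_asymm hba)
    rw [ih hjd htpl']
    have h1 : (b :: tpl).filter (fun t => !decide (t ∈ a :: jd))
        = b :: tpl.filter (fun t => !decide (t ∈ a :: jd)) :=
      List.filter_cons_of_pos (by simpa using hbnotin)
    have h2 : (a :: jd).filter (fun t => !decide (t ∈ b :: tpl))
        = (a :: jd).filter (fun t => !decide (t ∈ tpl)) := by
      refine List.filter_congr (fun t ht => ?_)
      have hne : t ≠ b := by
        rcases List.mem_cons.mp ht with h | h
        · subst h; exact ne_of_gt hba
        · exact ne_of_gt (lt_trans hba (hjgt t h))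
      simp [hne]
    have h3 : (a :: jd).filter (fun t => decide (t ∈ b :: tpl))
        = (a :: jd).filter (fun t => decide (t ∈ tpl)) := by
      refine List.filter_congr (fun t ht => ?_)
      have hne : t ≠ b := by
        rcases List.mem_cons.mp ht with h | h
        · subst h; exact ne_of_gt hba
        · exact ne_of_gt (lt_trans hba (hjgt t h))
      simp [hne]
    simp only [h1, h2, h3, List.map_cons, List.append_assoc, List.singleton_append]
  case case4 =>
    rename_i jd tpl m e p hne
    intro _ _
    rcases jd with _ | ⟨a, jd⟩
    · simp
    · rcases tpl with _ | ⟨b, tpl⟩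
      · simp
      · exact (hne a jd b tpl rfl rfl).elim

-- filtering a sorted deduplicated list = sorting the set that the filter carves out
lemma pv_filter_sorted (xs ys : List String) (q : String → Bool)
    (hxs : xs.Nodup) (hys : ys.Nodup)
    (hmem : ∀ x, x ∈ ys ↔ x ∈ xs ∧ q x = true) :
    (PySem.List.sorted xs (fun x => x) false).filter q
      = PySem.List.sorted ys (fun x => x) false := by
  have hperm : ((PySem.List.sorted xs (fun x => x) false).filter q).Perm ys := by
    rw [List.perm_ext_iff_of_nodup (List.Nodup.filter q ((PySem.List.sorted_perm xs (fun x => x) false).nodup_iff.mpr hxs)) hys]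
    intro a
    simp [List.mem_filter, PySem.List.mem_sorted, hmem]
  have hpw : ((PySem.List.sorted xs (fun x => x) false).filter q).Pairwise (fun a b => a < b) := by
    have hle := PySem.List.sorted_pairwise xs (fun x => x)
    have hnd : (PySem.List.sorted xs (fun x => x) false).Nodup :=
      (PySem.List.sorted_perm xs (fun x => x) false).nodup_iff.mpr hxs
    have : (PySem.List.sorted xs (fun x => x) false).Pairwise (fun a b => a < b) := by
      have := hle.and (List.nodup_iff_pairwise_ne.mp hnd)
      exact this.imp (fun h => lt_of_le_of_ne h.1 h.2)
    exact this.filter q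
  exact (PySem.List.sorted_eq_of_perm_of_pairwise_lt ys _ (fun x => x) hperm hpw).symm

-- ===== VERDICT (by name: the statement is the Claim_ definition above) =====
set_option maxHeartbeats 1000000 in
theorem compute_diff_against_template_spec : Claim_equal_compute_diff_against_template := by
  intro jd_text template_text _
  unfold Spec_compute_diff_against_template
  unfold compute_diff_against_template compute_diff_against_template_alt
  simp only [pv_filter_empty_split₀, pv_sortedUnique_eq]
  set jdS := PySem.Set.ofList (PySem.Str.split₀ (PySem.Str.lower jd_text)) with hjdS
  set tplS := PySem.Set.ofList (PySem.Str.split₀ (PySem.Str.lower template_text)) with htplS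
  set jdL := PySem.List.sorted jdS (fun x => x) false with hjdL
  set tplL := PySem.List.sorted tplS (fun x => x) false with htplL
  have hjdP : jdL.Pairwise (· < ·) := by
    rw [hjdL, hjdS]; exact PySem.List.sorted_ofList_pairwise_lt _
  have htplP : tplL.Pairwise (· < ·) := by
    rw [htplL, htplS]; exact PySem.List.sorted_ofList_pairwise_lt _
  rw [pv_mergeLoop_spec jdL tplL [] [] [] hjdP htplP]
  simp only [List.nil_append]
  have hjdN : jdS.Nodup := PySem.Set.nodup_ofList _
  have htplN : tplS.Nodup := PySem.Set.nodup_ofList _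
  rw [htplL, hjdL]
  rw [pv_filter_sorted tplS (PySem.Set.diff tplS jdS) _ htplN (PySem.Set.nodup_diff tplS jdS htplN)
      (by intro x; simp [PySem.Set.mem_diff, PySem.List.mem_sorted]),
    pv_filter_sorted jdS (PySem.Set.diff jdS tplS) _ hjdN (PySem.Set.nodup_diff jdS tplS hjdN)
      (by intro x; simp [PySem.Set.mem_diff, PySem.List.mem_sorted]),
    pv_filter_sorted jdS (PySem.Set.inter jdS tplS) _ hjdN (PySem.Set.nodup_inter jdS tplS hjdN)
      (by intro x; simp [PySem.Set.mem_inter, PySem.List.mem_sorted])]
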